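-- pv_equiv track=rewrite | github.com/akathorn/codejam | archive/2010/Round 1B/mkdir.py | solve
-- ===== SOURCE A (Python) =====
-- from collections import defaultdict
-- from typing import Any, Callable, List, TypeVar, Union
--
-- def solve(existing: List[List[str]], create: List[List[str]]) -> int:
--     tree = defaultdict(list)
--     for dir in existing:
--         path = ""
--         for p, c in zip(dir, dir[1:]):
--             path += p
--             tree[path].append(c)
--
--     ops = 0
--     for new in create:
--         path = ""
--         for p, c in zip(new, new[1:]):
--             path += p
--             if c not in tree[path]:
--                 ops += 1
--                 tree[path].append(c)
--
--     return ops
-- ===== SOURCE B (Python) =====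
-- from typing import List
--
--
-- def _edges(dirs: List[List[str]]) -> set:
--     # identity of a directory = (concatenation of its parent components, its last component),
--     # matching A's string-concatenation keying; built offline: join the whole path once,
--     # tabulate the prefix cut points, then pair each cut with its child component.
--     s = set()
--     for d in dirs:
--         full = "".join(d)
--         ends = []
--         t = 0
--         for comp in d[:-1]:
--             t += len(comp)
--             ends.append(t)
--         s |= {(full[:e], child) for e, child in zip(ends, d[1:])}
--     return s
--
--
-- def solve(existing: List[List[str]], create: List[List[str]]) -> int:
--     # inclusion-exclusion: number of new directories = |dirs(existing+create)| - |dirs(existing)|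
--     return len(_edges(existing + create)) - len(_edges(existing))
-- ===== Notes on version B (the rewrite author's own statement) =====
-- stated objective: alternative
-- what changed: Replaces A's online simulation (a growing concatenated path feeding a defaultdict tree of child lists, counting misses while mutating it) by an offline tabulation: per path, join the components once and tabulate prefix cut points, collect (prefix-slice, child) identity tuples into sets, and count by inclusion-exclusion len(dirs(existing+create)) - len(dirs(existing)); it trades the dict of lists for plain sets and keeps cost comparable.
import Mathlib
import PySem

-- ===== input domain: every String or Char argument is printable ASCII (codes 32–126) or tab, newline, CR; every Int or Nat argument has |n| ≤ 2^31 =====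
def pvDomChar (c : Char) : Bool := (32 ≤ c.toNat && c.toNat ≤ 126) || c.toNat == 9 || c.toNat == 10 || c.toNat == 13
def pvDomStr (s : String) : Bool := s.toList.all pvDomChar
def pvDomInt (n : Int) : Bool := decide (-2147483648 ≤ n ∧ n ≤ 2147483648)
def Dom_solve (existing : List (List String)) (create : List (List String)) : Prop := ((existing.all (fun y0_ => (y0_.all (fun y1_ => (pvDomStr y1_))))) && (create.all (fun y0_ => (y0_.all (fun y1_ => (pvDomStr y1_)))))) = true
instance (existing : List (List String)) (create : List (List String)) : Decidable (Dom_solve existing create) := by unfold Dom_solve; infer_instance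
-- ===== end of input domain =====

-- B replaces A's online defaultdict tree (growing concatenated path, child lists, counting
-- misses while mutating) by an offline tabulation: join each path once, tabulate prefix cut
-- points, collect (prefix-slice, child) identities into sets, and count by inclusion-exclusion
-- |dirs(existing+create)| - |dirs(existing)|; objective: alternative (comparable cost).

-- ===== PORT A =====
-- tree is a defaultdict(list); 'tree[path].append(c)' is modify with default [];
-- 'c not in tree[path]' reads tree[path] via getD [] (the defaultdict's silent insertion of an
-- empty list changes no later lookup, so getD is value-exact here).
def solve (existing : List (List String)) (create : List (List String)) : Int :=
  let tree : PySem.Dict String (List String) :=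
    existing.foldl (fun tree dir =>
      ((dir.zip dir.tail).foldl
        (fun (st : String × PySem.Dict String (List String)) pc =>
          let path := st.1 ++ pc.1
          (path, st.2.modify path [] (· ++ [pc.2])))
        ("", tree)).2)
      PySem.Dict.empty
  let res := create.foldl (fun (st : Int × PySem.Dict String (List String)) new =>
      ((new.zip new.tail).foldl
        (fun (st2 : String × Int × PySem.Dict String (List String)) pc =>
          let path := st2.1 ++ pc.1
          if pc.2 ∈ st2.2.2.getD path [] then (path, st2.2)
          else (path, st2.2.1 + 1, st2.2.2.modify path [] (· ++ [pc.2])))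
        ("", st)).2)
    (0, tree)
  res.1

-- ===== PORT B =====
-- Source B's _edges: per directory, full = "".join(d); the 'for comp in d[:-1]' loop tabulates the
-- running cut points t into ends; 's |= {…}' unions in the set comprehension over zip(ends, d[1:]).
def edgesB (dirs : List (List String)) : PySem.Set (String × String) :=
  dirs.foldl (fun s d =>
    let full := PySem.Str.join "" d
    let ends := ((PySem.List.slice d none (some (-1))).foldl
      (fun (st : Int × List Int) comp =>
        (st.1 + PySem.Str.len comp, st.2 ++ [st.1 + PySem.Str.len comp]))
      (0, [])).2
    PySem.Set.union s (PySem.Set.ofList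
      ((ends.zip (PySem.List.slice d (some 1) none)).map (fun ec =>
        (PySem.Str.slice full none (some ec.1), ec.2)))))
    PySem.Set.empty

def solve_alt (existing : List (List String)) (create : List (List String)) : Int :=
  PySem.Set.len (edgesB (existing ++ create)) - PySem.Set.len (edgesB existing)

-- ===== PRECONDITION & SPEC =====
def Spec_solve (existing : List (List String)) (create : List (List String)) (out : Int) : Prop := out = solve_alt existing create
instance (existing : List (List String)) (create : List (List String)) (out : Int) : Decidable (Spec_solve existing create out) := by unfold Spec_solve; infer_instance

-- ===== CLAIM (what is proved, stated in full; the proofs are below) =====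
def Claim_equal_solve : Prop := ∀ (existing : List (List String)) (create : List (List String)), Dom_solve existing create → Spec_solve existing create (solve existing create)

-- ===== LEMMAS AND PROOFS =====

-- the flat list of (path, child) edges of one directory path, starting from prefix 'path'
def goE : String → List String → List (String × String)
  | _, [] => []
  | _, [_] => []
  | path, p :: c :: rest => (path ++ p, c) :: goE (path ++ p) (c :: rest)

-- A's inner zip-fold in phase 1 is a fold of modify over goE
theorem zipA1 (d : List String) : ∀ (path : String) (t : PySem.Dict String (List String)),
    ((d.zip d.tail).foldl
      (fun (st : String × PySem.Dict String (List String)) pc =>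
        let path := st.1 ++ pc.1
        (path, st.2.modify path [] (· ++ [pc.2])))
      (path, t)).2
    = (goE path d).foldl (fun t e => t.modify e.1 [] (· ++ [e.2])) t := by
  induction d with
  | nil => intro path t; simp [goE]
  | cons p rest ih =>
    intro path t
    cases rest with
    | nil => simp [goE]
    | cons c rest' =>
      simp only [List.tail_cons, List.zip_cons_cons, List.foldl_cons, goE]
      exact ih (path ++ p) _

-- A's inner zip-fold in phase 2 is a fold over goE
theorem zipA2 (d : List String) : ∀ (path : String) (st : Int × PySem.Dict String (List String)),
    ((d.zip d.tail).foldl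
      (fun (st2 : String × Int × PySem.Dict String (List String)) pc =>
        let path := st2.1 ++ pc.1
        if pc.2 ∈ st2.2.2.getD path [] then (path, st2.2)
        else (path, st2.2.1 + 1, st2.2.2.modify path [] (· ++ [pc.2])))
      (path, st)).2
    = (goE path d).foldl
        (fun st e => if e.2 ∈ st.2.getD e.1 [] then st else (st.1 + 1, st.2.modify e.1 [] (· ++ [e.2]))) st := by
  induction d with
  | nil => intro path st; simp [goE]
  | cons p rest ih =>
    intro path st
    cases rest with
    | nil => simp [goE]
    | cons c rest' =>
      simp only [List.tail_cons, List.zip_cons_cons, List.foldl_cons, goE]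
      by_cases h : c ∈ st.2.getD (path ++ p) []
      · simp only [h, if_true]
        exact ih (path ++ p) _
      · simp only [h, if_false]
        exact ih (path ++ p) _

-- A's phase 2 counts exactly the fresh distinct edges, given a tree membership-equivalent to m
theorem phase2 (l : List (String × String)) :
    ∀ (ops : Int) (t : PySem.Dict String (List String)) (m : PySem.Set (String × String)),
    (∀ path c, c ∈ t.getD path [] ↔ (path, c) ∈ m) →
    (l.foldl (fun st e => if e.2 ∈ st.2.getD e.1 [] then st
                          else (st.1 + 1, st.2.modify e.1 [] (· ++ [e.2]))) (ops, t)).1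
      = ops + ((PySem.Set.update m l).length : Int) - (m.length : Int) := by
  induction l with
  | nil => intro ops t m _; simp [PySem.Set.update]
  | cons e l ih =>
    intro ops t m hinv
    rw [PySem.Set.update_cons]
    by_cases he : e.2 ∈ t.getD e.1 []
    · have hem : e ∈ m := by have := (hinv e.1 e.2).1 he; simpa using this
      rw [List.foldl_cons]
      simp only [he, if_true]
      rw [PySem.Set.add_of_mem hem]
      exact ih ops t m hinv
    · have hem : e ∉ m := fun hm => he ((hinv e.1 e.2).2 (by simpa using hm))
      rw [List.foldl_cons]
      simp only [he, if_false]
      rw [PySem.Set.add_of_not_mem hem]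
      have hinv' : ∀ path c, c ∈ (t.modify e.1 [] (· ++ [e.2])).getD path [] ↔ (path, c) ∈ m ++ [e] := by
        intro path c
        rw [PySem.Dict.getD_modify]
        by_cases hp : path = e.1 <;> simp [hp, ← hinv, Prod.ext_iff]
      have := ih (ops + 1) _ (m ++ [e]) hinv'
      rw [this]
      simp only [List.length_append, List.length_singleton]
      push_cast
      ring

-- "".join with empty separator distributes over cons (general intercalate-nil fact first)
theorem intercal_nil (l : List (List Char)) : [].intercalate l = l.flatten := by
  induction l with
  | nil => rfl
  | cons a l ih => cases l <;> simp_all [List.intercalate]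

theorem joinE_cons (p : String) (l : List String) :
    PySem.Str.join "" (p :: l) = p ++ PySem.Str.join "" l := by
  simp [PySem.Str.join, PySem.Chars.join, intercal_nil, String.ofList_append]

theorem joinE_nil : PySem.Str.join "" ([] : List String) = "" := rfl

theorem joinE_append (l1 l2 : List String) :
    PySem.Str.join "" (l1 ++ l2) = PySem.Str.join "" l1 ++ PySem.Str.join "" l2 := by
  induction l1 with
  | nil => simp [joinE_nil, String.empty_append]
  | cons p l ih => simp [joinE_cons, ih, String.append_assoc]

-- slicing a concatenation to the length of its left part returns the left part
theorem slice_prefix (u v : String) :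
    PySem.Str.slice (u ++ v) none (some (PySem.Str.len u)) = u := by
  simp [PySem.Str.slice, PySem.Str.len]

-- the partial sums of component lengths that B's ends-loop tabulates
def sums : List String → Int → List Int
  | [], _ => []
  | c :: l, t => (t + PySem.Str.len c) :: sums l (t + PySem.Str.len c)

theorem foldl_ends (l : List String) : ∀ (t : Int) (acc : List Int),
    (l.foldl (fun (st : Int × List Int) comp =>
        (st.1 + PySem.Str.len comp, st.2 ++ [st.1 + PySem.Str.len comp])) (t, acc)).2
    = acc ++ sums l t := by
  induction l with
  | nil => intro t acc; simp [sums]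
  | cons c l ih => intro t acc; rw [List.foldl_cons, ih]; simp [sums]

-- B's cut-point/child pairing over one directory is goE applied after the joined prefix
theorem edgesB_dir : ∀ (d pre : List String),
    ((sums d.dropLast (PySem.Str.len (PySem.Str.join "" pre))).zip d.tail).map
      (fun ec => (PySem.Str.slice (PySem.Str.join "" (pre ++ d)) none (some ec.1), ec.2))
    = goE (PySem.Str.join "" pre) d := by
  intro d
  induction d with
  | nil => intro pre; simp [sums, goE]
  | cons p rest ih =>
    intro pre
    cases rest with
    | nil => simp [sums, goE]
    | cons c rest' =>
      have hlen : PySem.Str.len (PySem.Str.join "" pre) + PySem.Str.len p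
          = PySem.Str.len (PySem.Str.join "" (pre ++ [p])) := by
        rw [joinE_append, PySem.Str.len_append]
        simp [joinE_cons, joinE_nil]
      have hjoin : PySem.Str.join "" (pre ++ [p]) = PySem.Str.join "" pre ++ p := by
        rw [joinE_append]
        simp [joinE_cons, joinE_nil]
      have hfull : pre ++ p :: c :: rest' = (pre ++ [p]) ++ (c :: rest') := by simp
      simp only [List.dropLast_cons₂, sums, List.tail_cons, List.zip_cons_cons, List.map_cons, goE]
      congr 1
      · rw [hlen, hfull, joinE_append, slice_prefix, hjoin]
      · rw [hlen, hfull]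
        have ih' := ih (pre ++ [p])
        simp only [List.tail_cons] at ih'
        rw [ih', hjoin]

-- one step of B's outer loop adds exactly the goE-edges of the directory
theorem union_ofList_eq_foldl_add (s : PySem.Set (String × String))
    (l : List (String × String)) :
    PySem.Set.union s (PySem.Set.ofList l) = l.foldl PySem.Set.add s := by
  show PySem.Set.update s (PySem.Set.ofList l) = PySem.Set.update s l
  rw [PySem.Set.update_eq_append_filter, PySem.Set.update_eq_append_filter,
    PySem.Set.ofList_ofList]

-- B's edge set is set(flat edge list)
theorem edgesB_eq (dirs : List (List String)) :
    edgesB dirs = PySem.Set.ofList (dirs.flatMap (goE "")) := by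
  have hbody : ∀ (s : PySem.Set (String × String)) (d : List String),
      (let full := PySem.Str.join "" d
       let ends := ((PySem.List.slice d none (some (-1))).foldl
        (fun (st : Int × List Int) comp =>
          (st.1 + PySem.Str.len comp, st.2 ++ [st.1 + PySem.Str.len comp]))
        (0, [])).2
       PySem.Set.union s (PySem.Set.ofList
        ((ends.zip (PySem.List.slice d (some 1) none)).map (fun ec =>
          (PySem.Str.slice full none (some ec.1), ec.2)))))
      = (goE "" d).foldl PySem.Set.add s := by
    intro s d
    have h0 : PySem.Str.len (PySem.Str.join "" ([] : List String)) = 0 := rfl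
    have := edgesB_dir d []
    rw [h0, joinE_nil] at this
    simp only [List.nil_append] at this
    simp only [PySem.List.slice_to_neg_one, PySem.List.slice_from_one, foldl_ends,
      List.nil_append, this, union_ofList_eq_foldl_add]
  unfold edgesB
  have h : ∀ (init : PySem.Set (String × String)) (ds : List (List String)),
      ds.foldl (fun s d =>
        let full := PySem.Str.join "" d
        let ends := ((PySem.List.slice d none (some (-1))).foldl
          (fun (st : Int × List Int) comp =>
            (st.1 + PySem.Str.len comp, st.2 ++ [st.1 + PySem.Str.len comp]))
          (0, [])).2
        PySem.Set.union s (PySem.Set.ofList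
          ((ends.zip (PySem.List.slice d (some 1) none)).map (fun ec =>
            (PySem.Str.slice full none (some ec.1), ec.2))))) init
      = (ds.flatMap (goE "")).foldl PySem.Set.add init := by
    intro init ds
    induction ds generalizing init with
    | nil => simp
    | cons d ds ihds =>
      simp only [List.foldl_cons, List.flatMap_cons, List.foldl_append]
      rw [hbody, ihds]
  rw [h, PySem.Set.ofList_eq_foldl]
  rfl

-- ===== VERDICT (by name: the statement is the Claim_ definition above) =====
theorem solve_spec : Claim_equal_solve := by
  intro existing create _
  unfold Spec_solve solve solve_alt
  simp only [zipA1, zipA2]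
  rw [← List.foldl_flatMap, ← List.foldl_flatMap, edgesB_eq, edgesB_eq, List.flatMap_append]
  set AE := existing.flatMap (goE "") with hAE
  set CE := create.flatMap (goE "") with hCE
  have hinv : ∀ path c,
      c ∈ (AE.foldl (fun t e => t.modify e.1 [] (· ++ [e.2])) PySem.Dict.empty).getD path []
        ↔ (path, c) ∈ PySem.Set.ofList AE := by
    intro path c
    rw [PySem.Dict.getD_foldl_modify_append, PySem.Set.mem_ofList]
    simp only [PySem.Dict.getD_empty, List.nil_append, List.mem_map, List.mem_filter, beq_iff_eq]
    constructor
    · rintro ⟨p, ⟨hp, h1⟩, h2⟩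
      cases p; subst h1; subst h2; exact hp
    · intro h; exact ⟨(path, c), ⟨h, rfl⟩, rfl⟩
  rw [phase2 CE 0 _ (PySem.Set.ofList AE) hinv]
  rw [PySem.Set.ofList_append]
  simp [PySem.Set.len]
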